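-- pv_equiv track=rewrite | github.com/sK0pe/adventOfCode | 2016/python/day11.py | get_two_different_items
-- ===== SOURCE A (Python) =====
-- def get_two_different_items(microchips, generators):
--     output = []
--     m_backup = microchips.copy()
--     g_backup = generators.copy()
--     for m in m_backup:
--         for g in g_backup:
--             microchips.discard(m)
--             generators.discard(g)
--             if safe_chips(microchips, generators):
--                 output.append([{m}, {g}])
--             assert isinstance(m, object)
--             microchips.add(m)
--             generators.add(g)
--     return output
--
-- def safe_chips(microchips, generators):
--     num_safe_pairs = 0
--     for gen in generators:
--         if gen in microchips:
--             num_safe_pairs += 1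
--     return num_safe_pairs == len(generators) or num_safe_pairs == len(microchips)
-- ===== SOURCE B (Python) =====
-- def get_two_different_items(microchips, generators):
--     k = sum(1 for g in generators if g in microchips)
--     nm, ng = len(microchips), len(generators)
--     output = []
--     for m in microchips:
--         dm = 1 if m in generators else 0
--         for g in generators:
--             k2 = k - dm - (1 if g in microchips else 0) + (1 if m == g else 0)
--             if k2 == ng - 1 or k2 == nm - 1:
--                 output.append([{m}, {g}])
--     return output
-- ===== Notes on version B (the rewrite author's own statement) =====
-- stated objective: faster
-- what changed: B precomputes the matched-pair count k = |microchips ∩ generators| once and tests each (m,g) pair with an O(1) incremental update of k, instead of A's mutate-the-sets-and-rescan safe_chips inner pass; B does not mutate its arguments.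
import Mathlib
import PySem

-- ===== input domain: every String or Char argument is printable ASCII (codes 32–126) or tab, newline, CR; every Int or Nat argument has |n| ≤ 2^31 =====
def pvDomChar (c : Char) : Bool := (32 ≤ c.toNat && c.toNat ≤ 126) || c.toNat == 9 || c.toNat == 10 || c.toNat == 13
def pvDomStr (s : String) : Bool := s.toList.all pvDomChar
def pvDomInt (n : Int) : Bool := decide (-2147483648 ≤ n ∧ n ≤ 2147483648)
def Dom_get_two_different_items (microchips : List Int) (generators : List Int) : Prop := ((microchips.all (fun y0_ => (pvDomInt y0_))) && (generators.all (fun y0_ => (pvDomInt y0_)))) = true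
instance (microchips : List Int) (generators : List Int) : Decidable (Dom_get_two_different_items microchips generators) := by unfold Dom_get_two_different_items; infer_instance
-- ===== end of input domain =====

-- B replaces A's per-pair O(G) safe_chips scan by one precomputed matched-pair count
-- updated in O(1) per pair: O(M·G) instead of O(M·G²).  A mutates its set arguments but
-- restores their contents before returning; the claim is about the return value.

-- ===== PORT A =====
def safeChips (microchips : List Int) (generators : List Int) : Bool :=
  let numSafePairs := generators.foldl (fun n gen => if microchips.contains gen then n + 1 else n) 0
  numSafePairs == generators.length || numSafePairs == microchips.length

def get_two_different_items (microchips : List Int) (generators : List Int) : List (List (List Int)) :=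
  let mBackup : PySem.Set Int := PySem.Set.ofList microchips
  let gBackup : PySem.Set Int := PySem.Set.ofList generators
  let fin :=
    mBackup.foldl (fun (st : List (List (List Int)) × PySem.Set Int × PySem.Set Int) m =>
      gBackup.foldl (fun st g =>
        let ms := PySem.Set.discard st.2.1 m
        let gs := PySem.Set.discard st.2.2 g
        let out := if safeChips ms gs then st.1 ++ [[[m], [g]]] else st.1
        (out, PySem.Set.add ms m, PySem.Set.add gs g)) st)
      ([], mBackup, gBackup)
  fin.1

-- ===== PORT B =====
def get_two_different_items_alt (microchips : List Int) (generators : List Int) : List (List (List Int)) :=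
  let ms : PySem.Set Int := PySem.Set.ofList microchips
  let gs : PySem.Set Int := PySem.Set.ofList generators
  let k : Int := gs.foldl (fun a g => if ms.contains g then a + 1 else a) 0
  let nm : Int := ms.length
  let ng : Int := gs.length
  ms.foldl (fun out m =>
    let dm : Int := if gs.contains m then 1 else 0
    gs.foldl (fun out g =>
      let k2 : Int := k - dm - (if ms.contains g then 1 else 0) + (if m == g then 1 else 0)
      if k2 == ng - 1 || k2 == nm - 1 then out ++ [[[m], [g]]] else out) out) []

-- ===== PRECONDITION & SPEC =====
def Spec_get_two_different_items (microchips : List Int) (generators : List Int) (out : List (List (List Int))) : Prop := out = get_two_different_items_alt microchips generators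
instance (microchips : List Int) (generators : List Int) (out : List (List (List Int))) : Decidable (Spec_get_two_different_items microchips generators out) := by unfold Spec_get_two_different_items; infer_instance

-- ===== CLAIM (what is proved, stated in full; the proofs are below) =====
def Claim_equal_get_two_different_items : Prop := ∀ (microchips : List Int) (generators : List Int), Dom_get_two_different_items microchips generators → Spec_get_two_different_items microchips generators (get_two_different_items microchips generators)

-- ===== LEMMAS AND PROOFS =====

-- countP of a filter combines into a countP of the conjunction
theorem pv_countP_filter (l : List Int) (p q : Int → Bool) :
    (l.filter q).countP p = l.countP (fun x => p x && q x) := by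
  induction l with
  | nil => rfl
  | cons x xs ih => by_cases h : q x <;> by_cases h2 : p x <;> simp [List.filter, h, h2, ih]

-- the counting loop of safe_chips is a countP (Nat accumulator)
theorem pv_foldl_count_nat (p : Int → Bool) (l : List Int) : ∀ n : Nat,
    l.foldl (fun n x => if p x then n + 1 else n) n = n + l.countP p := by
  induction l with
  | nil => simp
  | cons x xs ih => intro n; by_cases h : p x <;> simp [h, ih, List.countP_cons] <;> omega

-- the counting loop of B (Int accumulator) is a countP
theorem pv_foldl_count_int (p : Int → Bool) (l : List Int) : ∀ n : Int,
    l.foldl (fun n x => if p x then n + 1 else n) n = n + l.countP p := by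
  induction l with
  | nil => simp
  | cons x xs ih => intro n; by_cases h : p x <;> simp [h, ih, List.countP_cons] <;> push_cast <;> ring

-- safeChips as a statement about countP
theorem pv_safeChips_eq (M G : List Int) :
    safeChips M G = (G.countP (fun x => decide (x ∈ M)) == G.length ||
                     G.countP (fun x => decide (x ∈ M)) == M.length) := by
  have h : G.countP (fun gen => M.contains gen) = G.countP (fun x => decide (x ∈ M)) :=
    List.countP_congr (by intro x _; simp)
  simp only [safeChips]
  rw [pv_foldl_count_nat, h, Nat.zero_add]

-- safeChips only depends on its arguments up to permutation
theorem pv_safeChips_perm {M M' G G' : List Int} (hm : M.Perm M') (hg : G.Perm G') :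
    safeChips M G = safeChips M' G' := by
  have h : G'.countP (fun x => decide (x ∈ M)) = G'.countP (fun x => decide (x ∈ M')) :=
    List.countP_congr (by intro x _; simp [hm.mem_iff])
  rw [pv_safeChips_eq, pv_safeChips_eq, hg.length_eq, hm.length_eq, hg.countP_eq, h]

-- split the matched-pair count of G over (≠ g ∧ ≠ m), (= g), (= m ∧ ≠ g)
theorem pv_count_split (M : List Int) (m g : Int) (G : List Int) :
    G.countP (fun x => decide (x ∈ M)) =
      G.countP (fun x => decide (x ≠ g) && (decide (x ∈ M) && decide (x ≠ m)))
      + G.countP (fun x => decide (x = g) && decide (x ∈ M))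
      + G.countP (fun x => decide (x = m) && (decide (x ≠ g) && decide (x ∈ M))) := by
  induction G with
  | nil => rfl
  | cons x xs ih =>
    rw [List.countP_cons, List.countP_cons, List.countP_cons, List.countP_cons, ih]
    by_cases h1 : x ∈ M <;> by_cases h2 : x = g <;> by_cases h3 : x = m <;>
      by_cases h4 : m = g <;> by_cases h5 : m ∈ M <;> by_cases h6 : g ∈ M <;>
      simp [h1, h2, h3, h4, h5, h6] <;> omega

-- in a nodup list, the count of elements equal to a (and satisfying q) is an indicator
theorem pv_count_single (q : Int → Bool) (a : Int) : ∀ l : List Int, l.Nodup →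
    l.countP (fun x => decide (x = a) && q x) = if a ∈ l then (if q a then 1 else 0) else 0 := by
  intro l
  induction l with
  | nil => simp
  | cons x xs ih =>
    intro hnd
    rw [List.nodup_cons] at hnd
    rw [List.countP_cons, ih hnd.2]
    by_cases h : x = a
    · subst h
      simp [hnd.1]
    · simp [h, Ne.symm h]

-- discard on a nodup list is, up to permutation, a filter
theorem pv_discard_perm_filter (l : List Int) (a : Int) (h : l.Nodup) :
    (PySem.Set.discard l a).Perm (l.filter (fun x => decide (x ≠ a))) := by
  apply (List.perm_ext_iff_of_nodup (PySem.Set.nodup_discard l a h) (h.filter _)).mpr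
  intro x
  simp [PySem.Set.mem_discard, List.mem_filter]

theorem pv_length_discard (l : List Int) (a : Int) (h : l.Nodup) (ha : a ∈ l) :
    (PySem.Set.discard l a).length = l.length - 1 := by
  have hp : (PySem.Set.discard l a).Perm (l.erase a) := by
    apply (List.perm_ext_iff_of_nodup (PySem.Set.nodup_discard l a h) (h.erase a)).mpr
    intro x
    simp [PySem.Set.mem_discard, h.mem_erase_iff, and_comm]
  rw [hp.length_eq, List.length_erase_of_mem ha]

-- THE KEY LEMMA: A's per-pair safety check equals B's O(1) incremental condition
theorem pv_key (M G : List Int) (hM : M.Nodup) (hG : G.Nodup) {m g : Int}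
    (hm : m ∈ M) (hg : g ∈ G) :
    safeChips (PySem.Set.discard M m) (PySem.Set.discard G g) =
      (((G.countP (fun x => decide (x ∈ M)) : Int) - (if G.contains m then 1 else 0)
          - (if M.contains g then 1 else 0) + (if m == g then 1 else 0)) == (G.length : Int) - 1
       || ((G.countP (fun x => decide (x ∈ M)) : Int) - (if G.contains m then 1 else 0)
          - (if M.contains g then 1 else 0) + (if m == g then 1 else 0)) == (M.length : Int) - 1) := by
  rw [pv_safeChips_eq]
  have hcnt : (PySem.Set.discard G g).countP (fun x => decide (x ∈ PySem.Set.discard M m)) =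
      G.countP (fun x => decide (x ≠ g) && (decide (x ∈ M) && decide (x ≠ m))) := by
    rw [(pv_discard_perm_filter G g hG).countP_eq, pv_countP_filter]
    apply List.countP_congr
    intro x _
    simp [PySem.Set.mem_discard, Bool.and_comm]
  have hsplit := pv_count_split M m g G
  have h1 : G.countP (fun x => decide (x = g) && decide (x ∈ M)) =
      if g ∈ M then 1 else 0 := by
    rw [pv_count_single _ g G hG]; simp [hg]
  have h2 : G.countP (fun x => decide (x = m) && (decide (x ≠ g) && decide (x ∈ M))) =
      if m ∈ G then (if m = g then 0 else 1) else 0 := by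
    rw [pv_count_single _ m G hG]
    by_cases hmG : m ∈ G <;> by_cases hmg : m = g <;> simp [hmG, hmg, hm]
  have hGlen : 1 ≤ G.length := List.length_pos_of_mem hg
  have hMlen : 1 ≤ M.length := List.length_pos_of_mem hm
  have hcontG : G.contains m = decide (m ∈ G) := by simp
  have hcontM : M.contains g = decide (g ∈ M) := by simp
  rw [hcnt, pv_length_discard G g hG hg, pv_length_discard M m hM hm, hcontG, hcontM,
    hsplit, h1, h2]
  apply Bool.eq_iff_iff.mpr
  by_cases hmG : m ∈ G <;> by_cases hgM : g ∈ M <;> by_cases hmg : m = g <;>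
    (try simp [hmG, hgM, hmg, hm, hg] at hsplit h1 h2 ⊢) <;> omega

-- one inner pass of A (fixed m, iterating over gs) equals one inner pass of B,
-- and A's mutated sets stay nodup permutations of the originals
theorem pv_inner (M0 G0 : List Int) (hM0' : M0.Nodup) (hG0' : G0.Nodup)
    (cond : Int → Int → Bool)
    (hcond : ∀ (Ms Gs : List Int) (m g : Int), Ms.Nodup → Gs.Nodup → Ms.Perm M0 →
        Gs.Perm G0 → m ∈ M0 → g ∈ G0 →
        safeChips (PySem.Set.discard Ms m) (PySem.Set.discard Gs g) = cond m g)
    (m : Int) (hm : m ∈ M0) :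
    ∀ (l : List Int), (∀ x ∈ l, x ∈ G0) →
    ∀ (out : List (List (List Int))) (Ms Gs : List Int),
      Ms.Nodup → Gs.Nodup → Ms.Perm M0 → Gs.Perm G0 →
      (l.foldl (fun st g =>
          (if safeChips (PySem.Set.discard st.2.1 m) (PySem.Set.discard st.2.2 g)
             then st.1 ++ [[[m], [g]]] else st.1,
           PySem.Set.add (PySem.Set.discard st.2.1 m) m,
           PySem.Set.add (PySem.Set.discard st.2.2 g) g))
        (out, Ms, Gs)).1
          = l.foldl (fun out g => if cond m g then out ++ [[[m], [g]]] else out) out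
      ∧ (l.foldl (fun st g =>
          (if safeChips (PySem.Set.discard st.2.1 m) (PySem.Set.discard st.2.2 g)
             then st.1 ++ [[[m], [g]]] else st.1,
           PySem.Set.add (PySem.Set.discard st.2.1 m) m,
           PySem.Set.add (PySem.Set.discard st.2.2 g) g))
        (out, Ms, Gs)).2.1.Nodup
      ∧ (l.foldl (fun st g =>
          (if safeChips (PySem.Set.discard st.2.1 m) (PySem.Set.discard st.2.2 g)
             then st.1 ++ [[[m], [g]]] else st.1,
           PySem.Set.add (PySem.Set.discard st.2.1 m) m,
           PySem.Set.add (PySem.Set.discard st.2.2 g) g))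
        (out, Ms, Gs)).2.2.Nodup
      ∧ (l.foldl (fun st g =>
          (if safeChips (PySem.Set.discard st.2.1 m) (PySem.Set.discard st.2.2 g)
             then st.1 ++ [[[m], [g]]] else st.1,
           PySem.Set.add (PySem.Set.discard st.2.1 m) m,
           PySem.Set.add (PySem.Set.discard st.2.2 g) g))
        (out, Ms, Gs)).2.1.Perm M0
      ∧ (l.foldl (fun st g =>
          (if safeChips (PySem.Set.discard st.2.1 m) (PySem.Set.discard st.2.2 g)
             then st.1 ++ [[[m], [g]]] else st.1,
           PySem.Set.add (PySem.Set.discard st.2.1 m) m,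
           PySem.Set.add (PySem.Set.discard st.2.2 g) g))
        (out, Ms, Gs)).2.2.Perm G0 := by
  intro l
  induction l with
  | nil => intro _ out Ms Gs h1 h2 h3 h4; exact ⟨rfl, h1, h2, h3, h4⟩
  | cons g l ih =>
    intro hl out Ms Gs hMs hGs hpM hpG
    have hgG0 : g ∈ G0 := hl g (by simp)
    have hl' : ∀ x ∈ l, x ∈ G0 := fun x hx => hl x (by simp [hx])
    have hMs' : (PySem.Set.add (PySem.Set.discard Ms m) m).Nodup :=
      PySem.Set.nodup_add _ _ (PySem.Set.nodup_discard Ms m hMs)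
    have hGs' : (PySem.Set.add (PySem.Set.discard Gs g) g).Nodup :=
      PySem.Set.nodup_add _ _ (PySem.Set.nodup_discard Gs g hGs)
    have hpM' : (PySem.Set.add (PySem.Set.discard Ms m) m).Perm M0 := by
      apply (List.perm_ext_iff_of_nodup hMs' hM0').mpr
      intro x
      simp only [PySem.Set.mem_add, PySem.Set.mem_discard]
      constructor
      · rintro (⟨hx, _⟩ | rfl)
        · exact hpM.mem_iff.mp hx
        · exact hm
      · intro hx
        by_cases hxm : x = m
        · exact Or.inr hxm
        · exact Or.inl ⟨hpM.mem_iff.mpr hx, hxm⟩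
    have hpG' : (PySem.Set.add (PySem.Set.discard Gs g) g).Perm G0 := by
      apply (List.perm_ext_iff_of_nodup hGs' hG0').mpr
      intro x
      simp only [PySem.Set.mem_add, PySem.Set.mem_discard]
      constructor
      · rintro (⟨hx, _⟩ | rfl)
        · exact hpG.mem_iff.mp hx
        · exact hgG0
      · intro hx
        by_cases hxg : x = g
        · exact Or.inr hxg
        · exact Or.inl ⟨hpG.mem_iff.mpr hx, hxg⟩
    simp only [List.foldl_cons]
    rw [hcond Ms Gs m g hMs hGs hpM hpG hm hgG0]
    exact ih hl' _ _ _ hMs' hGs' hpM' hpG'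

-- the full nested loop of A equals the nested loop of B
theorem pv_outer (M0 G0 : List Int) (hM0 : M0.Nodup) (hG0 : G0.Nodup)
    (cond : Int → Int → Bool)
    (hcond : ∀ (Ms Gs : List Int) (m g : Int), Ms.Nodup → Gs.Nodup → Ms.Perm M0 →
        Gs.Perm G0 → m ∈ M0 → g ∈ G0 →
        safeChips (PySem.Set.discard Ms m) (PySem.Set.discard Gs g) = cond m g) :
    ∀ (l : List Int), (∀ x ∈ l, x ∈ M0) →
    ∀ (out : List (List (List Int))) (Ms Gs : List Int),
      Ms.Nodup → Gs.Nodup → Ms.Perm M0 → Gs.Perm G0 →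
      (l.foldl (fun st m => G0.foldl (fun st g =>
          (if safeChips (PySem.Set.discard st.2.1 m) (PySem.Set.discard st.2.2 g)
             then st.1 ++ [[[m], [g]]] else st.1,
           PySem.Set.add (PySem.Set.discard st.2.1 m) m,
           PySem.Set.add (PySem.Set.discard st.2.2 g) g)) st)
        (out, Ms, Gs)).1
          = l.foldl (fun out m =>
              G0.foldl (fun out g => if cond m g then out ++ [[[m], [g]]] else out) out) out := by
  intro l
  induction l with
  | nil => intro _ out Ms Gs _ _ _ _; rfl
  | cons m l ih =>
    intro hl out Ms Gs hMs hGs hpM hpG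
    have hmM0 : m ∈ M0 := hl m (by simp)
    have hl' : ∀ x ∈ l, x ∈ M0 := fun x hx => hl x (by simp [hx])
    simp only [List.foldl_cons]
    obtain ⟨e1, e2, e3, e4, e5⟩ :=
      pv_inner M0 G0 hM0 hG0 cond hcond m hmM0 G0 (fun x hx => hx) out Ms Gs hMs hGs hpM hpG
    rcases hr : G0.foldl (fun st g =>
          (if safeChips (PySem.Set.discard st.2.1 m) (PySem.Set.discard st.2.2 g)
             then st.1 ++ [[[m], [g]]] else st.1,
           PySem.Set.add (PySem.Set.discard st.2.1 m) m,
           PySem.Set.add (PySem.Set.discard st.2.2 g) g)) (out, Ms, Gs) with ⟨o, Ms', Gs'⟩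
    rw [hr] at e1 e2 e3 e4 e5
    rw [hr, ih hl' o Ms' Gs' e2 e3 e4 e5]
    exact congrArg (fun z => List.foldl (fun out m =>
      List.foldl (fun out g => if cond m g then out ++ [[[m], [g]]] else out) out G0) z l) e1

-- permutation congruence for discard
theorem pv_discard_congr {S T : List Int} (a : Int) (hS : S.Nodup) (hT : T.Nodup)
    (h : S.Perm T) : (PySem.Set.discard S a).Perm (PySem.Set.discard T a) := by
  apply (List.perm_ext_iff_of_nodup (PySem.Set.nodup_discard S a hS)
    (PySem.Set.nodup_discard T a hT)).mpr
  intro x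
  simp only [PySem.Set.mem_discard, h.mem_iff]

-- ===== VERDICT (by name: the statement is the Claim_ definition above) =====
theorem get_two_different_items_spec : Claim_equal_get_two_different_items := by
  intro mc gen _
  unfold Spec_get_two_different_items
  have hM0 : (PySem.Set.ofList mc).Nodup := PySem.Set.nodup_ofList mc
  have hG0 : (PySem.Set.ofList gen).Nodup := PySem.Set.nodup_ofList gen
  exact pv_outer (PySem.Set.ofList mc) (PySem.Set.ofList gen) hM0 hG0
    (fun m g =>
      ((((PySem.Set.ofList gen).foldl
            (fun a x => if (PySem.Set.ofList mc).contains x then a + 1 else a) (0 : Int))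
          - (if (PySem.Set.ofList gen).contains m then 1 else 0)
          - (if (PySem.Set.ofList mc).contains g then 1 else 0)
          + (if m == g then 1 else 0)) == ((PySem.Set.ofList gen).length : Int) - 1
       || (((PySem.Set.ofList gen).foldl
            (fun a x => if (PySem.Set.ofList mc).contains x then a + 1 else a) (0 : Int))
          - (if (PySem.Set.ofList gen).contains m then 1 else 0)
          - (if (PySem.Set.ofList mc).contains g then 1 else 0)
          + (if m == g then 1 else 0)) == ((PySem.Set.ofList mc).length : Int) - 1))
    (by
      intro Ms Gs m g hMs hGs hpM hpG hm hg
      rw [pv_safeChips_perm (pv_discard_congr m hMs hM0 hpM) (pv_discard_congr g hGs hG0 hpG),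
        pv_key (PySem.Set.ofList mc) (PySem.Set.ofList gen) hM0 hG0 hm hg]
      have hk : ((PySem.Set.ofList gen).foldl
            (fun a x => if (PySem.Set.ofList mc).contains x then a + 1 else a) (0 : Int))
          = (((PySem.Set.ofList gen).countP (fun x => decide (x ∈ PySem.Set.ofList mc)) : Nat) : Int) := by
        rw [pv_foldl_count_int (fun x => (PySem.Set.ofList mc).contains x) (PySem.Set.ofList gen) 0,
          zero_add]
        congr 1
        exact List.countP_congr (by intro x _; simp)
      rw [hk]
      rfl)
    (PySem.Set.ofList mc) (fun _ hx => hx) [] (PySem.Set.ofList mc) (PySem.Set.ofList gen)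
    hM0 hG0 (List.Perm.refl _) (List.Perm.refl _)
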